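-- pv_equiv track=rewrite | github.com/Progambler227788/CP-CompetativeProgramming | 10 September/removFirstAndSecondLetter.py | giveLength
-- ===== SOURCE A (Python) =====
-- def giveLength(current):
--     if len(current) == 1:
--        return 1
--
--     data = set()
--     ans = 0
--     for i in current:
--         data.add(i)
--         ans += len(data)
--
--     # count = 0
--
--
--     return ans
-- ===== SOURCE B (Python) =====
-- def giveLength(current):
--     n = len(current)
--     first = {}
--     for i, ch in enumerate(current):
--         if ch not in first:
--             first[ch] = i
--     return sum(n - idx for idx in first.values())
-- ===== Notes on version B (the rewrite author's own statement) =====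
-- stated objective: alternative
-- what changed: Replaces A's running-set loop (add each char, accumulate the set's size after every step) by a single pass that records each character's first-occurrence index in a dict and returns the closed contribution sum sum(n - idx), dropping A's redundant len==1 special case.
import Mathlib
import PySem

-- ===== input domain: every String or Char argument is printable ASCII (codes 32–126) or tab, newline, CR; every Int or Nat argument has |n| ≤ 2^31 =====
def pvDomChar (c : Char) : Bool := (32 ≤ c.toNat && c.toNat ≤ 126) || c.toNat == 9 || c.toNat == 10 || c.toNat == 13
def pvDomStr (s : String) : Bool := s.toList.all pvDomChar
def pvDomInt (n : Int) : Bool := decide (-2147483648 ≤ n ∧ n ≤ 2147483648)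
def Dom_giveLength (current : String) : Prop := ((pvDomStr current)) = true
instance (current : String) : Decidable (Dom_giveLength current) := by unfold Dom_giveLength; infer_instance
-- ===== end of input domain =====

-- B replaces A's running-set loop by a first-occurrence-index dict and the closed
-- contribution formula sum(n - idx); objective: alternative decomposition (same cost class).

-- ===== PORT A =====
def giveLength (current : String) : Int :=
  if PySem.Str.len current = 1 then 1
  else
    (current.toList.foldl
      (fun (st : PySem.Set Char × Int) c =>
        let data := PySem.Set.add st.1 c
        (data, st.2 + (PySem.Set.len data)))
      (PySem.Set.empty, 0)).2

-- ===== PORT B =====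
def giveLength_alt (current : String) : Int :=
  let n : Int := PySem.Str.len current
  let first := (PySem.List.enumerate current.toList).foldl
      (fun (d : PySem.Dict Char Int) p =>
        if d.contains p.2 then d else d.insert p.2 p.1)
      PySem.Dict.empty
  first.values.foldl (fun a idx => a + (n - idx)) 0

-- ===== PRECONDITION & SPEC =====
def Spec_giveLength (current : String) (out : Int) : Prop := out = giveLength_alt current
instance (current : String) (out : Int) : Decidable (Spec_giveLength current out) := by unfold Spec_giveLength; infer_instance

-- ===== CLAIM (what is proved, stated in full; the proofs are below) =====
def Claim_equal_giveLength : Prop := ∀ (current : String), Dom_giveLength current → Spec_giveLength current (giveLength current)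

-- ===== LEMMAS AND PROOFS =====

-- enumerate over an extended list (structural helper)
theorem pv_enumerate_append (xs ys : List Char) (s : Int) :
    PySem.List.enumerate (xs ++ ys) s
      = PySem.List.enumerate xs s ++ PySem.List.enumerate ys (s + xs.length) := by
  induction xs generalizing s with
  | nil => simp [PySem.List.enumerate_nil]
  | cons x xs ih =>
      simp [PySem.List.enumerate_cons, ih, add_assoc]
      ring_nf

-- B's summation loop in closed form
theorem pv_foldl_sub_sum (vs : List Int) (n a : Int) :
    vs.foldl (fun acc i => acc + (n - i)) a = a + n * vs.length - vs.sum := by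
  induction vs generalizing a with
  | nil => simp
  | cons v vs ih => simp [ih]; ring

-- joint loop invariant: A's running set is B's dict's key list, and A's running sum
-- equals n*k - Σ(first indices) for the current prefix
theorem pv_inv (l : List Char) :
    ((l.foldl
        (fun (st : PySem.Set Char × Int) c => (st.1.add c, st.2 + (st.1.add c).len))
        (PySem.Set.empty, 0)).1
      = ((PySem.List.enumerate l).foldl
          (fun (d : PySem.Dict Char Int) p =>
            if d.contains p.2 then d else d.insert p.2 p.1)
          PySem.Dict.empty).keys)
    ∧ ((l.foldl
        (fun (st : PySem.Set Char × Int) c => (st.1.add c, st.2 + (st.1.add c).len))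
        (PySem.Set.empty, 0)).2
      = (l.length : Int) * (((PySem.List.enumerate l).foldl
          (fun (d : PySem.Dict Char Int) p =>
            if d.contains p.2 then d else d.insert p.2 p.1)
          PySem.Dict.empty).size : Int)
        - ((PySem.List.enumerate l).foldl
          (fun (d : PySem.Dict Char Int) p =>
            if d.contains p.2 then d else d.insert p.2 p.1)
          PySem.Dict.empty).values.sum) := by
  induction l using List.reverseRecOn with
  | nil => constructor <;> decide
  | append_singleton l c ih =>
      obtain ⟨h1, h2⟩ := ih
      rw [pv_enumerate_append]
      simp only [List.foldl_append, PySem.List.enumerate_cons, PySem.List.enumerate_nil,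
        List.foldl_cons, List.foldl_nil]
      set d := (PySem.List.enumerate l).foldl
          (fun (d : PySem.Dict Char Int) p =>
            if d.contains p.2 then d else d.insert p.2 p.1)
          PySem.Dict.empty with hd
      set st := l.foldl
        (fun (st : PySem.Set Char × Int) c => (st.1.add c, st.2 + (st.1.add c).len))
        (PySem.Set.empty, 0) with hst
      by_cases hc : d.contains c = true
      · have hmem : c ∈ st.1 := by
          rw [h1]; exact (PySem.Dict.contains_iff_mem_keys d c).mp hc
        rw [if_pos hc, PySem.Set.add_of_mem hmem]
        refine ⟨h1, ?_⟩
        have hk : (st.1.len : Int) = (d.size : Int) := by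
          simp [PySem.Set.len, h1, PySem.Dict.keys, PySem.Dict.size]
        rw [h2, hk]
        simp [List.length_append]
        ring
      · have hnmem : c ∉ st.1 := by
          rw [h1]
          exact fun hm => hc ((PySem.Dict.contains_iff_mem_keys d c).mpr hm)
        have hcf : d.contains c = false := by simpa using hc
        rw [if_neg hc, PySem.Set.add_of_not_mem hnmem]
        constructor
        · rw [PySem.Dict.keys_insert_of_not_contains d _ hcf, h1]
        · have hkeys : (st.1.length : Int) = (d.size : Int) := by
            rw [h1]; simp [PySem.Dict.keys, PySem.Dict.size]
          have hvals : (d.insert c (0 + (l.length : Int))).values = d.values ++ [0 + (l.length : Int)] := by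
            simp [PySem.Dict.values, PySem.Dict.items_insert_of_not_contains d _ hcf]
          have hsz : ((d.insert c (0 + (l.length : Int))).size : Int) = (d.size : Int) + 1 := by
            simp [PySem.Dict.size, PySem.Dict.items_insert_of_not_contains d _ hcf]
          rw [hvals, hsz, h2]
          simp only [PySem.Set.len, List.length_append, List.sum_append, List.sum_cons,
            List.sum_nil, List.length_cons, List.length_nil]
          push_cast
          rw [hkeys]
          ring

-- ===== VERDICT (by name: the statement is the Claim_ definition above) =====
theorem giveLength_spec : Claim_equal_giveLength := by
  intro current hdom
  unfold Spec_giveLength giveLength giveLength_alt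
  simp only [PySem.Str.len_eq]
  obtain ⟨h1, h2⟩ := pv_inv current.toList
  rw [pv_foldl_sub_sum]
  by_cases h : ((current.toList.length : Int)) = 1
  · rw [if_pos h]
    obtain ⟨c, hc⟩ := List.length_eq_one_iff.mp (by exact_mod_cast h)
    rw [hc]
    simp [PySem.List.enumerate_cons, PySem.List.enumerate_nil, PySem.Dict.values, PySem.Dict.insert, PySem.Dict.empty]
  · rw [if_neg h, h2]
    have hlen : (
        ((PySem.List.enumerate current.toList).foldl
          (fun (d : PySem.Dict Char Int) p =>
            if d.contains p.2 then d else d.insert p.2 p.1)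
          PySem.Dict.empty).values.length : Int)
        = (((PySem.List.enumerate current.toList).foldl
          (fun (d : PySem.Dict Char Int) p =>
            if d.contains p.2 then d else d.insert p.2 p.1)
          PySem.Dict.empty).size : Int) := by
      simp [PySem.Dict.values, PySem.Dict.size]
    rw [hlen]
    ring
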